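-- pv_equiv track=rewrite | github.com/jprice8/interview-prep | other/numberGame.py | maxScoreTopDown
-- ===== SOURCE A (Python) =====
-- from functools import lru_cache
-- import math
--
-- def maxScoreTopDown(nums):
--     @lru_cache(None)
--     def dfs(i, mask):
--         if i > len(nums) // 2:
--             return 0
--         res = 0
--         for j in range(len(nums)):
--             for k in range(j + 1, len(nums)):
--                 new_mask = (1 << j) + (1 << k)
--                 if not mask & new_mask:
--                     res = max(res, i * math.gcd(nums[j], nums[k]) + dfs(i + 1, mask + new_mask))
--
--         return res
--     return dfs(1, 0)
-- ===== SOURCE B (Python) =====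
-- import math
--
-- def maxScoreTopDown(nums):
--     n = len(nums)
--     m = n // 2
--     pairs = [(j, k, math.gcd(nums[j], nums[k]))
--              for j in range(n) for k in range(j + 1, n)]
--     size = 1 << n
--     prev = [0] * size  # layer for operation index m + 1: nothing left to score
--     for i in range(m, 0, -1):  # tabulate layer i from layer i + 1
--         cur = []
--         for mask in range(size):
--             best = 0
--             for j, k, g in pairs:
--                 pm = (1 << j) + (1 << k)
--                 if not mask & pm:
--                     v = i * g + prev[mask + pm]
--                     if v > best:
--                         best = v
--             cur.append(best)
--         prev = cur
--     return prev[0]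
-- ===== Notes on version B (the rewrite author's own statement) =====
-- stated objective: alternative
-- what changed: Replaces the top-down lru_cache recursion over (operation index, mask) with an iterative bottom-up tabulation that precomputes all pair gcds once and builds one 2^n-entry layer per operation index from the next layer, returning the layer-1 entry for mask 0.
import Mathlib
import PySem

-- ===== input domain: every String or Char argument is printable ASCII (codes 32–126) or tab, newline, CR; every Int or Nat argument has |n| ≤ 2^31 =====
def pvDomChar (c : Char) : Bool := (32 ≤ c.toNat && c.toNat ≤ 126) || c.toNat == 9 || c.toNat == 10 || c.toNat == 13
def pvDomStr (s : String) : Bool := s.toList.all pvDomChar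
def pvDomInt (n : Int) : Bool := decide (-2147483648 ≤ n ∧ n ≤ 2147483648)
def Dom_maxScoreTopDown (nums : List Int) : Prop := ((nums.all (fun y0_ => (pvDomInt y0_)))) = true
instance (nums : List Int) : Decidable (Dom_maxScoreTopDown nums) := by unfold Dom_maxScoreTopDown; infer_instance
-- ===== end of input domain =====

-- B replaces A's top-down lru_cache recursion by an iterative bottom-up layer-by-layer
-- tabulation over bitmasks with the pair gcds precomputed once (objective: alternative).

-- ===== PORT A =====
-- literal port of A's memoized `dfs(i, mask)`: `@lru_cache` is ported as an explicitly threaded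
-- hash table (4096 buckets of association entries, keyed by the argument pair; lookup before the
-- body, store after, as lru_cache does); `range(j+1, len(nums))` is `List.range' (j+1) (len-(j+1))`,
-- `nums[j]` is `nums.getD j 0` (exact: j, k always in range), `1 << j` is `1 <<< j`, `math.gcd`
-- on ints is `Int.gcd` cast back to Int (exact: Python's gcd of ints is the nonnegative gcd)
def pvAssoc : List ((Nat × Nat) × Int) → (Nat × Nat) → Option Int
  | [], _ => none
  | e :: t, key => if e.1 = key then some e.2 else pvAssoc t key

def pvGet (memo : Array (List ((Nat × Nat) × Int))) (key : Nat × Nat) : Option Int :=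
  pvAssoc (memo.getD ((key.1 + key.2) % 4096) []) key

def pvPut (memo : Array (List ((Nat × Nat) × Int))) (key : Nat × Nat) (v : Int) :
    Array (List ((Nat × Nat) × Int)) :=
  memo.setIfInBounds ((key.1 + key.2) % 4096)
    ((key, v) :: memo.getD ((key.1 + key.2) % 4096) [])

def dfsM (nums : List Int) (i : Nat) (mask : Nat) (memo : Array (List ((Nat × Nat) × Int))) :
    Int × Array (List ((Nat × Nat) × Int)) :=
  match pvGet memo (i, mask) with
  | some v => (v, memo)
  | none =>
    let r :=
      if _h : i > nums.length / 2 then ((0 : Int), memo)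
      else
        (List.range nums.length).foldl
          (fun acc j =>
            (List.range' (j + 1) (nums.length - (j + 1))).foldl
              (fun acc k =>
                let new_mask := (1 <<< j) + (1 <<< k)
                if mask &&& new_mask = 0 then
                  let res2 := dfsM nums (i + 1) (mask + new_mask) acc.2
                  (max acc.1 ((i : Int) * (Int.gcd (nums.getD j 0) (nums.getD k 0) : Int) + res2.1),
                    res2.2)
                else acc)
              acc)
          (0, memo)
    (r.1, pvPut r.2 (i, mask) r.1)
termination_by nums.length / 2 + 1 - i
decreasing_by omega

def maxScoreTopDown (nums : List Int) : Int :=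
  (dfsM nums 1 0 (Array.replicate 4096 [])).1

-- ===== PORT B =====
-- the precomputed `pairs` list of Source B (a double comprehension = flatMap of maps)
def pairsB (nums : List Int) : List (Nat × Nat × Int) :=
  (List.range nums.length).flatMap (fun j =>
    (List.range' (j + 1) (nums.length - (j + 1))).map (fun k =>
      (j, k, (Int.gcd (nums.getD j 0) (nums.getD k 0) : Int))))

-- the inner `best` loop of Source B for one mask; the Python list `prev` is an `Array Int`,
-- `prev[mask + pm]` is `prev.getD (mask + pm) 0` (exact: the index is always in range there)
def bestB (pairs : List (Nat × Nat × Int)) (prev : Array Int) (i : Nat) (mask : Nat) : Int :=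
  pairs.foldl
    (fun best p =>
      let pm := (1 <<< p.1) + (1 <<< p.2.1)
      if mask &&& pm = 0 then
        let v := (i : Int) * p.2.2 + prev.getD (mask + pm) 0
        if v > best then v else best
      else best)
    0

-- Source B's downward `for i in range(m, 0, -1)` tabulation: the table after having processed
-- layers m, m-1, …, i (the initial all-zero table plays the role of layer m+1);
-- `cur.append(…)` is `Array.push`
def lyrB (nums : List Int) (pairs : List (Nat × Nat × Int)) (i : Nat) : Array Int :=
  if _h : i > nums.length / 2 then Array.replicate (1 <<< nums.length) 0
  else
    let prev := lyrB nums pairs (i + 1)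
    (List.range (1 <<< nums.length)).foldl (fun cur mask => cur.push (bestB pairs prev i mask)) #[]
termination_by nums.length / 2 + 1 - i
decreasing_by omega

def maxScoreTopDown_alt (nums : List Int) : Int :=
  (lyrB nums (pairsB nums) 1).getD 0 0

-- ===== PRECONDITION & SPEC =====
def Spec_maxScoreTopDown (nums : List Int) (out : Int) : Prop := out = maxScoreTopDown_alt nums
instance (nums : List Int) (out : Int) : Decidable (Spec_maxScoreTopDown nums out) := by unfold Spec_maxScoreTopDown; infer_instance

-- ===== CLAIM (what is proved, stated in full; the proofs are below) =====
def Claim_equal_maxScoreTopDown : Prop := ∀ (nums : List Int), Dom_maxScoreTopDown nums → Spec_maxScoreTopDown nums (maxScoreTopDown nums)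

-- ===== LEMMAS AND PROOFS =====

-- the memo-free recurrence both ports compute (proof-only reference function)
def dfsP (nums : List Int) (i : Nat) (mask : Nat) : Int :=
  if _h : i > nums.length / 2 then 0
  else
    (List.range nums.length).foldl
      (fun res j =>
        (List.range' (j + 1) (nums.length - (j + 1))).foldl
          (fun res k =>
            let new_mask := (1 <<< j) + (1 <<< k)
            if mask &&& new_mask = 0 then
              max res ((i : Int) * (Int.gcd (nums.getD j 0) (nums.getD k 0) : Int)
                        + dfsP nums (i + 1) (mask + new_mask))
            else res)
          res)
      0
termination_by nums.length / 2 + 1 - i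
decreasing_by omega

-- every cached value is the reference value
def pvInv (nums : List Int) (memo : Array (List ((Nat × Nat) × Int))) : Prop :=
  memo.size = 4096 ∧ ∀ i mask v, pvGet memo (i, mask) = some v → v = dfsP nums i mask

-- a memo-threading fold agrees with the memo-free fold and preserves the cache invariant
lemma pv_foldl_sim {α : Type} (nums : List Int)
    (fM : (Int × Array (List ((Nat × Nat) × Int))) → α → (Int × Array (List ((Nat × Nat) × Int))))
    (fP : Int → α → Int)
    (h : ∀ acc x, pvInv nums acc.2 → (fM acc x).1 = fP acc.1 x ∧ pvInv nums (fM acc x).2)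
    (L : List α) :
    ∀ acc, pvInv nums acc.2 →
      (L.foldl fM acc).1 = L.foldl fP acc.1 ∧ pvInv nums (L.foldl fM acc).2 := by
  induction L with
  | nil => exact fun acc h2 => ⟨rfl, h2⟩
  | cons x t iht =>
    intro acc h2
    have hx := h acc x h2
    have ht := iht (fM acc x) hx.2
    simp only [List.foldl_cons, ← hx.1]
    exact ht

lemma pv_inv_insert (nums : List Int) (memo : Array (List ((Nat × Nat) × Int))) (i mask : Nat)
    (x : Int) (hInv : pvInv nums memo) (hx : x = dfsP nums i mask) :
    pvInv nums (pvPut memo (i, mask) x) := by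
  obtain ⟨hsz, hInv⟩ := hInv
  refine ⟨by simp [pvPut, hsz], ?_⟩
  intro i' mask' v hl'
  simp only [pvGet, pvPut, Array.getD_eq_getD_getElem?, Array.getElem?_setIfInBounds] at hl'
  by_cases hbkt : (i + mask) % 4096 = (i' + mask') % 4096
  · rw [if_pos hbkt, if_pos (by omega)] at hl'
    simp only [Option.getD_some, pvAssoc] at hl'
    by_cases he : ((i, mask) : Nat × Nat) = (i', mask')
    · rw [if_pos he] at hl'
      have h1 : i = i' := congrArg Prod.fst he
      have h2 : mask = mask' := congrArg Prod.snd he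
      subst h1
      subst h2
      simp at hl'
      subst hl'
      exact hx
    · rw [if_neg he] at hl'
      apply hInv i' mask' v
      simp only [pvGet, Array.getD_eq_getD_getElem?]
      rw [← hbkt]
      exact hl'
  · rw [if_neg hbkt] at hl'
    apply hInv i' mask' v
    simp only [pvGet, Array.getD_eq_getD_getElem?]
    exact hl'

lemma pv_dfsM_eq_dfsP (nums : List Int) :
    ∀ (f i mask : Nat) (memo : Array (List ((Nat × Nat) × Int))),
      nums.length / 2 + 1 - i ≤ f → pvInv nums memo →
      (dfsM nums i mask memo).1 = dfsP nums i mask ∧ pvInv nums (dfsM nums i mask memo).2 := by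
  intro f
  induction f with
  | zero =>
    intro i mask memo hf hInv
    have hi : i > nums.length / 2 := by omega
    have hval : dfsP nums i mask = 0 := by rw [dfsP]; simp [hi]
    rw [dfsM]
    cases hl : pvGet memo (i, mask) with
    | some v => exact ⟨hInv.2 i mask v hl, hInv⟩
    | none =>
      simp only [dif_pos hi]
      exact ⟨by simp [hval], pv_inv_insert nums memo i mask _ hInv hval.symm⟩
  | succ f ih =>
    intro i mask memo hf hInv
    rw [dfsM]
    cases hl : pvGet memo (i, mask) with
    | some v => exact ⟨hInv.2 i mask v hl, hInv⟩
    | none =>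
      by_cases hi : i > nums.length / 2
      · have hval : dfsP nums i mask = 0 := by rw [dfsP]; simp [hi]
        simp only [dif_pos hi]
        exact ⟨by simp [hval], pv_inv_insert nums memo i mask _ hInv hval.symm⟩
      · simp only [dif_neg hi]
        have houter := pv_foldl_sim nums
          (fun acc j =>
            (List.range' (j + 1) (nums.length - (j + 1))).foldl
              (fun acc k =>
                let new_mask := (1 <<< j) + (1 <<< k)
                if mask &&& new_mask = 0 then
                  let res2 := dfsM nums (i + 1) (mask + new_mask) acc.2
                  (max acc.1 ((i : Int) * (Int.gcd (nums.getD j 0) (nums.getD k 0) : Int) + res2.1),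
                    res2.2)
                else acc)
              acc)
          (fun res j =>
            (List.range' (j + 1) (nums.length - (j + 1))).foldl
              (fun res k =>
                let new_mask := (1 <<< j) + (1 <<< k)
                if mask &&& new_mask = 0 then
                  max res ((i : Int) * (Int.gcd (nums.getD j 0) (nums.getD k 0) : Int)
                            + dfsP nums (i + 1) (mask + new_mask))
                else res)
              res)
          (fun accj j hInvj => by
            exact pv_foldl_sim nums _ _
              (fun acck k hInvk => by
                by_cases hc : mask &&& ((1 <<< j) + (1 <<< k)) = 0
                · have hrec := ih (i + 1) (mask + ((1 <<< j) + (1 <<< k))) acck.2 (by omega) hInvk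
                  refine ⟨?_, ?_⟩
                  · simp only [if_pos hc]
                    rw [hrec.1]
                  · simp only [if_pos hc]
                    exact hrec.2
                · refine ⟨?_, ?_⟩
                  · simp only [if_neg hc]
                  · simp only [if_neg hc]
                    exact hInvk)
              (List.range' (j + 1) (nums.length - (j + 1))) accj hInvj)
          (List.range nums.length) (0, memo) hInv
        have hval : dfsP nums i mask =
            (List.range nums.length).foldl
              (fun res j =>
                (List.range' (j + 1) (nums.length - (j + 1))).foldl
                  (fun res k =>
                    let new_mask := (1 <<< j) + (1 <<< k)
                    if mask &&& new_mask = 0 then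
                      max res ((i : Int) * (Int.gcd (nums.getD j 0) (nums.getD k 0) : Int)
                                + dfsP nums (i + 1) (mask + new_mask))
                    else res)
                  res)
              0 := by
          rw [dfsP]; simp only [dif_neg hi]
        refine ⟨?_, pv_inv_insert nums _ i mask _ houter.2 ?_⟩
        · rw [hval]
          exact houter.1
        · rw [hval]
          exact houter.1

-- disjoint numbers add like they or
lemma pv_add_eq_or_of_and_eq_zero (a b : Nat) (h : a &&& b = 0) : a + b = a ||| b := by
  induction a using Nat.strong_induction_on generalizing b with
  | _ a ih =>
    match a with
    | 0 => simp
    | a + 1 =>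
      have h2 : (a + 1) / 2 &&& b / 2 = 0 := by
        rw [← Nat.and_div_two, h]
      have ihh := ih ((a + 1) / 2) (by omega) (b / 2) h2
      have hp : ¬((a + 1) % 2 = 1 ∧ b % 2 = 1) := by
        intro ⟨h1, hb⟩
        have h0 : (a + 1 &&& b) % 2 = 0 := by rw [h]
        have := Nat.and_mod_two_eq_one (a := a + 1) (b := b)
        omega
      have hor2 : ((a + 1) ||| b) / 2 = (a + 1) / 2 ||| b / 2 := Nat.or_div_two
      have horm := Nat.or_mod_two_eq_one (a := a + 1) (b := b)
      omega

lemma pv_mask_step_lt {n j k mask : Nat} (hj : j < n) (hk : k < n) (hjk : j ≠ k)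
    (hm : mask < 2 ^ n) (hd : mask &&& (2 ^ j + 2 ^ k) = 0) : mask + (2 ^ j + 2 ^ k) < 2 ^ n := by
  have hdisj : 2 ^ j &&& 2 ^ k = 0 := by
    rw [Nat.and_two_pow, Nat.testBit_two_pow_of_ne hjk]
    simp
  have hpm : 2 ^ j + 2 ^ k = 2 ^ j ||| 2 ^ k := pv_add_eq_or_of_and_eq_zero _ _ hdisj
  have hjlt : 2 ^ j < 2 ^ n := Nat.pow_lt_pow_right (by omega) hj
  have hklt : 2 ^ k < 2 ^ n := Nat.pow_lt_pow_right (by omega) hk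
  rw [pv_add_eq_or_of_and_eq_zero _ _ hd, hpm]
  exact Nat.or_lt_two_pow hm (by rw [hpm] at *; exact Nat.or_lt_two_pow hjlt hklt)

lemma pv_foldl_push (L : List Nat) (f : Nat → Int) (a : Array Int) :
    L.foldl (fun cur m => cur.push (f m)) a = (a.toList ++ L.map f).toArray := by
  induction L generalizing a with
  | nil => simp
  | cons x t iht => simp [iht, Array.toList_push]

lemma pv_getD_push_range {f : Nat → Int} {N mask : Nat} (h : mask < N) :
    ((List.range N).foldl (fun cur m => cur.push (f m)) #[]).getD mask 0 = f mask := by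
  rw [pv_foldl_push, Array.getD_eq_getD_getElem?]
  simp [List.getElem?_map, List.getElem?_range, h]

lemma pv_foldl_flatMap {α β γ : Type} (l : List α) (g : α → List β) (f : γ → β → γ) (init : γ) :
    (l.flatMap g).foldl f init = l.foldl (fun acc a => (g a).foldl f acc) init := by
  induction l generalizing init with
  | nil => rfl
  | cons x t ihl => simp [List.flatMap_cons, List.foldl_append, ihl]

lemma pv_lyr_eq_dfs (nums : List Int) :
    ∀ (f i mask : Nat), nums.length / 2 + 1 - i ≤ f → mask < 1 <<< nums.length →
      (lyrB nums (pairsB nums) i).getD mask 0 = dfsP nums i mask := by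
  intro f
  induction f with
  | zero =>
    intro i mask hf _
    have hi : i > nums.length / 2 := by omega
    rw [lyrB, dfsP]
    simp [hi]
    rw [Array.getElem?_replicate]
    split <;> rfl
  | succ f ih =>
    intro i mask hf hmask
    by_cases hi : i > nums.length / 2
    · rw [lyrB, dfsP]
      simp [hi]
      rw [Array.getElem?_replicate]
      split <;> rfl
    · rw [lyrB, dfsP]
      simp only [dif_neg hi]
      rw [pv_getD_push_range (by simpa using hmask)]
      simp only [bestB, pairsB] at ih ⊢
      rw [pv_foldl_flatMap]
      refine List.foldl_ext _ _ _ ?_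
      intro res j hj
      rw [List.foldl_map]
      refine List.foldl_ext _ _ _ ?_
      intro res' k hk
      simp only [List.mem_range] at hj
      have hk' : j + 1 ≤ k ∧ k < nums.length := by
        rw [List.mem_range'_1] at hk
        omega
      simp only []
      by_cases hc : mask &&& ((1 <<< j) + (1 <<< k)) = 0
      · rw [if_pos hc, if_pos hc,
          ih (i + 1) (mask + ((1 <<< j) + (1 <<< k))) (by omega)
            (by
              simp only [Nat.one_shiftLeft] at hc hmask ⊢
              exact pv_mask_step_lt hj hk'.2 (by omega) hmask hc)]
        rw [max_def]
        split_ifs <;> omega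
      · rw [if_neg hc, if_neg hc]

-- ===== VERDICT (by name: the statement is the Claim_ definition above) =====
theorem maxScoreTopDown_spec : Claim_equal_maxScoreTopDown := by
  intro nums _
  unfold Spec_maxScoreTopDown maxScoreTopDown maxScoreTopDown_alt
  have hInv : pvInv nums (Array.replicate 4096 []) := by
    refine ⟨by simp, ?_⟩
    intro i mask v hl
    rw [pvGet, Array.getD_eq_getD_getElem?, Array.getElem?_replicate] at hl
    split at hl <;> simp [pvAssoc] at hl
  rw [(pv_dfsM_eq_dfsP nums (nums.length / 2 + 1) 1 0 _ (by omega) hInv).1]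
  exact (pv_lyr_eq_dfs nums (nums.length / 2 + 1) 1 0 (by omega)
    (by simp [Nat.one_shiftLeft])).symm
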